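-- pv_equiv track=rewrite | github.com/posl/comment_recommendation | script/split_gen/3_time/en/243_B/9.py | solve
-- ===== SOURCE A (Python) =====
-- def solve(N, A, B):
--     # A_i = B_i
--     same = 0
--     for i in range(N):
--         if A[i] == B[i]:
--             same += 1
--     # A_i = B_j, i != j
--     diff = 0
--     for i in range(N):
--         for j in range(N):
--             if i != j and A[i] == B[j]:
--                 diff += 1
--     return same, diff
-- ===== SOURCE B (Python) =====
-- def solve(N, A, B):
--     # Count occurrences of each value among B[0:N] once, then a single pass:
--     # total pairs (i, j) with A[i] == B[j] come from the counter; subtract the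
--     # equal-index matches to get the i != j count.  O(N) instead of O(N^2).
--     countB = {}
--     for j in range(N):
--         v = B[j]
--         countB[v] = countB.get(v, 0) + 1
--     total = 0
--     same = 0
--     for i in range(N):
--         a = A[i]
--         total += countB.get(a, 0)
--         if a == B[i]:
--             same += 1
--     return same, total - same
-- ===== Notes on version B (the rewrite author's own statement) =====
-- stated objective: faster
-- what changed: Replaces the O(N^2) nested scan with a one-pass value counter over B: total matching pairs come from hash counts and the equal-index matches are subtracted, so the inner loop disappears.
import Mathlib
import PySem

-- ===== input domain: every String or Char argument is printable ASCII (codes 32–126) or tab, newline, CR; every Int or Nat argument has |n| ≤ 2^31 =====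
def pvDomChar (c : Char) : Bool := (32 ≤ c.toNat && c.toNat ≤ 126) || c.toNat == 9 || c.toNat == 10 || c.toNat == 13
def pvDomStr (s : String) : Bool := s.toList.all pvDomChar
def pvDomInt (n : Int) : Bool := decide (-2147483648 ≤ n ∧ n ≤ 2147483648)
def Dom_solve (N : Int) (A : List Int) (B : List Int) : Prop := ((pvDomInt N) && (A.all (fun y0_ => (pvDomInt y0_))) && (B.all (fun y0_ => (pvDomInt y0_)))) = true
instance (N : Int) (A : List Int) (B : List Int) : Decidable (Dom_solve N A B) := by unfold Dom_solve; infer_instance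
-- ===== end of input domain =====

-- B replaces A's O(N^2) nested scan with a one-pass value counter over B (total matches minus equal-index matches): asymptotically faster.

-- ===== PORT A =====
def solve (N : Int) (A : List Int) (B : List Int) : Int × Int :=
  let same : Int := (PySem.List.pyRange 0 N 1).foldl
    (fun same i =>
      if PySem.List.pyGetD A i 0 = PySem.List.pyGetD B i 0 then same + 1 else same) 0
  let diff : Int := (PySem.List.pyRange 0 N 1).foldl
    (fun diff i =>
      (PySem.List.pyRange 0 N 1).foldl
        (fun diff j =>
          if i ≠ j ∧ PySem.List.pyGetD A i 0 = PySem.List.pyGetD B j 0 then diff + 1 else diff)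
        diff) 0
  (same, diff)

-- ===== PORT B =====
def solve_alt (N : Int) (A : List Int) (B : List Int) : Int × Int :=
  let countB : PySem.Dict Int Int := (PySem.List.pyRange 0 N 1).foldl
    (fun d j =>
      let v := PySem.List.pyGetD B j 0
      d.insert v (d.getD v 0 + 1)) PySem.Dict.empty
  let ts : Int × Int := (PySem.List.pyRange 0 N 1).foldl
    (fun (ts : Int × Int) i =>
      let a := PySem.List.pyGetD A i 0
      (ts.1 + countB.getD a 0,
       if a = PySem.List.pyGetD B i 0 then ts.2 + 1 else ts.2)) (0, 0)
  (ts.2, ts.1 - ts.2)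

-- ===== PRECONDITION & SPEC =====
-- Pre_ excludes exactly the inputs where A raises IndexError: a positive N exceeding a list length.
def Pre_solve (N : Int) (A : List Int) (B : List Int) : Prop :=
  N ≤ 0 ∨ (N ≤ (A.length : Int) ∧ N ≤ (B.length : Int))
instance (N : Int) (A : List Int) (B : List Int) : Decidable (Pre_solve N A B) := by unfold Pre_solve; infer_instance
def pvWitness_solve : Int × List Int × List Int := (2, ([1, 2], [2, 2]))

def Spec_solve (N : Int) (A : List Int) (B : List Int) (out : Int × Int) : Prop := out = solve_alt N A B
instance (N : Int) (A : List Int) (B : List Int) (out : Int × Int) : Decidable (Spec_solve N A B out) := by unfold Spec_solve; infer_instance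

-- ===== CLAIM (what is proved, stated in full; the proofs are below) =====
def Claim_equal_solve : Prop := ∀ (N : Int) (A : List Int) (B : List Int), Dom_solve N A B → Pre_solve N A B → Spec_solve N A B (solve N A B)

-- ===== LEMMAS AND PROOFS =====

-- pyRange 0 N 1 is the cast image of List.range N.toNat (also for N ≤ 0, where both are empty).
theorem pyRange_toNat (N : Int) :
    PySem.List.pyRange 0 N 1 = List.map (fun (k : Nat) => (k : Int)) (List.range N.toNat) := by
  by_cases h : N ≤ 0
  · have h0 : N.toNat = 0 := Int.toNat_of_nonpos h
    simp [PySem.List.pyRange, h0, not_lt.mpr h]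
  · have hN : N = ((N.toNat : Nat) : Int) := (Int.toNat_of_nonneg (by omega)).symm
    rw [hN, PySem.List.pyRange_zero_natCast]
    congr 2

-- counting fold with a Prop-valued if
theorem foldl_ite_count {α : Type} (p : α → Prop) [DecidablePred p] (l : List α) (a : Int) :
    l.foldl (fun acc x => if p x then acc + 1 else acc) a
      = a + (l.countP (fun x => decide (p x)) : Int) := by
  rw [← PySem.List.foldl_count_if (fun x => decide (p x)) l a]
  simp

-- splitting a count by a second test
theorem countP_split {α : Type} (p q : α → Bool) (l : List α) :
    l.countP p = l.countP (fun x => q x && p x) + l.countP (fun x => !q x && p x) := by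
  induction l with
  | nil => simp
  | cons x xs ih =>
    cases hq : q x <;> cases hp : p x <;> simp [hq, hp, ih] <;> omega

-- B's counter fold is the PySem counter
theorem counter_fold (l : List Int) :
    l.foldl (fun d j => d.insert j (d.getD j 0 + 1)) (PySem.Dict.empty : PySem.Dict Int Int)
      = PySem.Dict.counter l := rfl

-- the per-row identity: for i < n, the i ≠ j matches are all matches minus the diagonal one
theorem row_identity (a b : Nat → Int) (n i : Nat) (hi : i < n) :
    ((List.range n).countP (fun (j : Nat) => decide (¬ (i : Int) = (j : Int) ∧ a i = b j)) : Int)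
      = ((List.range n).countP (fun (j : Nat) => decide (a i = b j)) : Int)
        - (if a i = b i then 1 else 0) := by
  have hsplit := countP_split (fun (j : Nat) => decide (a i = b j)) (fun j => decide (j = i)) (List.range n)
  have h1 : (List.range n).countP (fun j => decide (j = i) && decide (a i = b j))
      = (if a i = b i then 1 else 0) := by
    have hc : ∀ j ∈ List.range n,
        ((fun j => decide (j = i) && decide (a i = b j)) j = true)
          ↔ ((fun j => decide (j = i) && decide (a i = b i)) j = true) := by
      intro j _
      by_cases hji : j = i <;> simp [hji]
    rw [List.countP_congr hc]
    by_cases hab : a i = b i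
    · have : (List.range n).countP (fun j => decide (j = i) && decide (a i = b i))
          = (List.range n).count i := by
        rw [List.count_eq_countP]
        apply List.countP_congr
        intro j _
        simp [hab]
      rw [this, List.count_range, if_pos hi, if_pos hab]
    · simp [hab]
  have h2 : (List.range n).countP (fun (j : Nat) => decide (¬ (i : Int) = (j : Int) ∧ a i = b j))
      = (List.range n).countP (fun j => !decide (j = i) && decide (a i = b j)) := by
    apply List.countP_congr
    intro j _
    simp only [decide_eq_true_eq, Bool.and_eq_true, Bool.not_eq_true', decide_eq_false_iff_not]
    constructor
    · rintro ⟨h1, h2⟩; exact ⟨by omega, h2⟩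
    · rintro ⟨h1, h2⟩; exact ⟨by omega, h2⟩
  rw [h2]
  have := hsplit
  rw [h1] at this
  by_cases hab : a i = b i <;> simp [hab] at this ⊢ <;> omega

-- sum of a difference of Int-valued maps
theorem sum_map_sub {α : Type} (f g : α → Int) (l : List α) :
    (l.map (fun x => f x - g x)).sum = (l.map f).sum - (l.map g).sum := by
  induction l with
  | nil => simp
  | cons x xs ih => simp [ih]; ring

-- ===== VERDICT (by name: the statement is the Claim_ definition above) =====
theorem solve_spec : Claim_equal_solve := by
  intro N A B _ hpre
  unfold Spec_solve solve solve_alt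
  rw [pyRange_toNat]
  set n := N.toNat with hn
  set a : Nat → Int := fun i => A.getD i 0 with ha
  set b : Nat → Int := fun i => B.getD i 0 with hb
  -- index bounds inside the range
  have hnA : n ≤ A.length := by
    rcases hpre with h | ⟨h, _⟩ <;> omega
  have hnB : n ≤ B.length := by
    rcases hpre with h | ⟨_, h⟩ <;> omega
  simp only [List.foldl_map, PySem.List.pyGetD_natCast]
  -- B's counter gives counts of b-values
  have hcnt : ∀ v : Int,
      ((List.range n).foldl (fun d j => d.insert (b j) ((d.getD (b j) 0) + 1))
        (PySem.Dict.empty : PySem.Dict Int Int)).getD v 0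
        = (((List.range n).map b).count v : Int) := by
    intro v
    have : (List.range n).foldl (fun d j => d.insert (b j) ((d.getD (b j) 0) + 1))
        (PySem.Dict.empty : PySem.Dict Int Int)
        = ((List.range n).map b).foldl (fun d x => d.insert x (d.getD x 0 + 1))
            (PySem.Dict.empty : PySem.Dict Int Int) := by
      rw [List.foldl_map]
    rw [this, counter_fold, PySem.Dict.getD_counter]
  -- split B's pair fold
  rw [PySem.List.foldl_prod_mk
    (fun t (i : Nat) => t + ((List.range n).foldl (fun d j => d.insert (b j) ((d.getD (b j) 0) + 1))
        (PySem.Dict.empty : PySem.Dict Int Int)).getD (a i) 0)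
    (fun s (i : Nat) => if a i = b i then s + 1 else s)]
  -- same components
  have hsame : (List.range n).foldl (fun s i => if a i = b i then s + 1 else s) (0 : Int)
      = ((List.range n).countP (fun i => decide (a i = b i)) : Int) := by
    rw [foldl_ite_count]; ring
  -- totals
  have htot : (List.range n).foldl
      (fun t i => t + ((List.range n).foldl (fun d j => d.insert (b j) ((d.getD (b j) 0) + 1))
        (PySem.Dict.empty : PySem.Dict Int Int)).getD (a i) 0) (0 : Int)
      = ((List.range n).map (fun i => ((((List.range n).map b).count (a i)) : Int))).sum := by
    rw [PySem.List.foldl_add]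
    simp only [hcnt]
    ring
  -- A's diff as a sum of per-row counts
  have hinner : ∀ (d : Int) (i : Nat),
      (List.range n).foldl
        (fun diff (j : Nat) => if ¬ (i : Int) = (j : Int) ∧ a i = b j then diff + 1 else diff) d
      = d + ((List.range n).countP (fun (j : Nat) => decide (¬ (i : Int) = (j : Int) ∧ a i = b j)) : Int) := by
    intro d i
    rw [foldl_ite_count]
  have hdiff : (List.range n).foldl
      (fun diff (i : Nat) => (List.range n).foldl
        (fun diff (j : Nat) => if ¬ (i : Int) = (j : Int) ∧ a i = b j then diff + 1 else diff) diff) (0 : Int)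
      = ((List.range n).map
          (fun (i : Nat) => ((List.range n).countP (fun (j : Nat) => decide (¬ (i : Int) = (j : Int) ∧ a i = b j)) : Int))).sum := by
    have : ((fun (diff : Int) (i : Nat) => (List.range n).foldl
        (fun diff (j : Nat) => if ¬ (i : Int) = (j : Int) ∧ a i = b j then diff + 1 else diff) diff))
        = (fun (diff : Int) (i : Nat) => diff +
            ((List.range n).countP (fun (j : Nat) => decide (¬ (i : Int) = (j : Int) ∧ a i = b j)) : Int)) := by
      funext d i; exact hinner d i
    rw [this, PySem.List.foldl_add]
    ring
  -- rewrite per row using row_identity, then sum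
  have hrow : ((List.range n).map
        (fun (i : Nat) => ((List.range n).countP (fun (j : Nat) => decide (¬ (i : Int) = (j : Int) ∧ a i = b j)) : Int))).sum
      = ((List.range n).map (fun i => ((((List.range n).map b).count (a i)) : Int))).sum
        - ((List.range n).countP (fun i => decide (a i = b i)) : Int) := by
    have hmapeq : ((List.range n).map
        (fun (i : Nat) => ((List.range n).countP (fun (j : Nat) => decide (¬ (i : Int) = (j : Int) ∧ a i = b j)) : Int)))
        = ((List.range n).map
            (fun (i : Nat) => (((List.range n).countP (fun (j : Nat) => decide (a i = b j)) : Int)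
              - (if a i = b i then 1 else 0)))) := by
      apply List.map_congr_left
      intro i hi
      exact row_identity a b n i (List.mem_range.mp hi)
    have hcnteq : ∀ i : Nat, (((List.range n).map b).count (a i) : Int)
        = ((List.range n).countP (fun (j : Nat) => decide (a i = b j)) : Int) := by
      intro i
      rw [List.count_eq_countP, List.countP_map]
      exact congrArg (fun m : Nat => (m : Int)) (List.countP_congr (fun j _ => by
        simp only [Function.comp_apply, beq_iff_eq, decide_eq_true_eq]
        exact eq_comm))
    have hsum1 : ((List.range n).map (fun i => (if a i = b i then (1 : Int) else 0))).sum
        = ((List.range n).countP (fun i => decide (a i = b i)) : Int) := by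
      rw [← PySem.List.sum_map_ite_one_zero (fun i => decide (a i = b i)) (List.range n)]
      congr 1
      apply List.map_congr_left
      intro i _
      by_cases h : a i = b i <;> simp [h]
    rw [hmapeq, sum_map_sub, hsum1]
    have hm : List.map (fun (i : Nat) => (((List.range n).countP (fun (j : Nat) => decide (a i = b j)) : Int))) (List.range n)
        = List.map (fun (i : Nat) => ((((List.range n).map b).count (a i)) : Int)) (List.range n) :=
      List.map_congr_left (fun i _ => (hcnteq i).symm)
    rw [hm]
  rw [hsame, htot, hdiff, hrow]
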